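-- pv_equiv track=rewrite | github.com/SSC-MAX/SRTWM | matrix-ber.py | merge_extracted_messages
-- ===== SOURCE A (Python) =====
-- def merge_extracted_messages(items):
--     # 取最大长度
--     max_len = max(len(item["extracted_message"]) for item in items)
--
--     result = []
--     for col in range(max_len):
--         ones = zeros = 0
--
--         for item in items:
--             msg = item["extracted_message"]
--             if col < len(msg):
--                 if msg[col] == 1:
--                     ones += 1
--                 else:
--                     zeros += 1
--
--         # 取多数（若相等，这里默认取 1）
--         result.append(1 if ones >= zeros else 0)
--
--     return result
-- ===== SOURCE B (Python) =====
-- def merge_extracted_messages(items):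
--     max_len = max(len(item["extracted_message"]) for item in items)
--
--     ones = [0] * max_len
--     zeros = [0] * max_len
--     for item in items:
--         msg = item["extracted_message"]
--         for col, bit in enumerate(msg):
--             if bit == 1:
--                 ones[col] += 1
--             else:
--                 zeros[col] += 1
--
--     return [1 if o >= z else 0 for o, z in zip(ones, zeros)]
-- ===== Notes on version B (the rewrite author's own statement) =====
-- stated objective: alternative
-- what changed: A rescans all items once per output column (column-major nested loops); B makes a single row-major pass over the items tallying into two per-column count arrays and then emits the majority in one decision pass.
import Mathlib
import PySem

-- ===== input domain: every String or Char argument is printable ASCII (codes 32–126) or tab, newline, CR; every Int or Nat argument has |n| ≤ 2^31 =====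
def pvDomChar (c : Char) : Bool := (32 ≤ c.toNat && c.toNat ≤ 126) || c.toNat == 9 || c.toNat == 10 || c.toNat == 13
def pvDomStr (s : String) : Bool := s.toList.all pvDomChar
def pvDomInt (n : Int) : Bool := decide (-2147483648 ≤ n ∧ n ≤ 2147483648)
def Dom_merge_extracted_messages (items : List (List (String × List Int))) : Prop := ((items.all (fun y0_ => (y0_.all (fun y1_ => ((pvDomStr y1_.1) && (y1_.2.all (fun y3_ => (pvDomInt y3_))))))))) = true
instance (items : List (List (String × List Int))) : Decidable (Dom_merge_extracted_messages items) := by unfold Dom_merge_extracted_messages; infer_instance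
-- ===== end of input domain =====

-- B replaces A's column-major rescan of all items per output position by one row-major
-- tally pass into two count arrays plus a decision pass (objective: alternative decomposition).

-- item["extracted_message"]  (both Pythons contain this very lookup; Pre_ guarantees the key is present)
def pvMsg (item : List (String × List Int)) : List Int :=
  ((PySem.Dict.mk item).get? "extracted_message").getD []

-- ===== PORT A =====
def merge_extracted_messages (items : List (List (String × List Int))) : List Int :=
  -- max_len = max(len(item["extracted_message"]) for item in items)
  let maxLen : Int :=
    (PySem.List.max? (items.map (fun it => ((pvMsg it).length : Int))) (fun x => x)).getD 0
  (PySem.List.pyRange 0 maxLen 1).foldl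
    (fun result col =>
      let oz := items.foldl
        (fun (oz : Int × Int) it =>
          let msg := pvMsg it
          if col < (msg.length : Int) then
            if PySem.List.pyGetD msg col 0 = 1 then (oz.1 + 1, oz.2) else (oz.1, oz.2 + 1)
          else oz) ((0 : Int), (0 : Int))
      result ++ [if oz.2 ≤ oz.1 then (1 : Int) else 0]) []

-- ===== PORT B =====
def merge_extracted_messages_alt (items : List (List (String × List Int))) : List Int :=
  let maxLen : Int :=
    (PySem.List.max? (items.map (fun it => ((pvMsg it).length : Int))) (fun x => x)).getD 0
  let oz := items.foldl
    (fun (oz : List Int × List Int) it =>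
      (PySem.List.enumerate (pvMsg it) 0).foldl
        (fun (oz : List Int × List Int) cb =>
          if cb.2 = 1 then
            (PySem.List.pySetD oz.1 cb.1 (PySem.List.pyGetD oz.1 cb.1 0 + 1), oz.2)
          else
            (oz.1, PySem.List.pySetD oz.2 cb.1 (PySem.List.pyGetD oz.2 cb.1 0 + 1))) oz)
    (List.replicate maxLen.toNat 0, List.replicate maxLen.toNat 0)
  (oz.1.zip oz.2).map (fun p => if p.2 ≤ p.1 then (1 : Int) else 0)

-- ===== PRECONDITION & SPEC =====
-- Pre_ excludes exactly the inputs where the Python A raises: empty `items` (ValueError from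
-- max() over an empty generator) and an item without the "extracted_message" key (KeyError).
def Pre_merge_extracted_messages (items : List (List (String × List Int))) : Prop :=
  items ≠ [] ∧ ∀ it ∈ items, ((PySem.Dict.mk it).get? "extracted_message").isSome = true
instance (items : List (List (String × List Int))) : Decidable (Pre_merge_extracted_messages items) := by
  unfold Pre_merge_extracted_messages; infer_instance

def pvWitness_merge_extracted_messages : (List (List (String × List Int))) :=
  [[("extracted_message", [1, 0, 1])], [("extracted_message", [0, 1])]]

def Spec_merge_extracted_messages (items : List (List (String × List Int))) (out : List Int) : Prop := out = merge_extracted_messages_alt items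
instance (items : List (List (String × List Int))) (out : List Int) : Decidable (Spec_merge_extracted_messages items out) := by unfold Spec_merge_extracted_messages; infer_instance

-- ===== CLAIM (what is proved, stated in full; the proofs are below) =====
def Claim_equal_merge_extracted_messages : Prop := ∀ (items : List (List (String × List Int))), Dom_merge_extracted_messages items → Pre_merge_extracted_messages items → Spec_merge_extracted_messages items (merge_extracted_messages items)

-- ===== LEMMAS AND PROOFS =====

-- per-column tallies, the common mathematical content of both programs
def cnt1 (items : List (List (String × List Int))) (c : Nat) : Int :=
  (items.map (fun it =>
    if c < (pvMsg it).length ∧ (pvMsg it).getD c 0 = 1 then (1 : Int) else 0)).sum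
def cnt0 (items : List (List (String × List Int))) (c : Nat) : Int :=
  (items.map (fun it =>
    if c < (pvMsg it).length ∧ ¬ (pvMsg it).getD c 0 = 1 then (1 : Int) else 0)).sum

theorem cnt1_cons (it : List (String × List Int)) (rest : List (List (String × List Int))) (c : Nat) :
    cnt1 (it :: rest) c
      = (if c < (pvMsg it).length ∧ (pvMsg it).getD c 0 = 1 then 1 else 0) + cnt1 rest c := by
  simp [cnt1]

theorem cnt0_cons (it : List (String × List Int)) (rest : List (List (String × List Int))) (c : Nat) :
    cnt0 (it :: rest) c
      = (if c < (pvMsg it).length ∧ ¬ (pvMsg it).getD c 0 = 1 then 1 else 0) + cnt0 rest c := by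
  simp [cnt0]

-- A's inner step over one item at column col
def astep (col : Int) : Int × Int → List (String × List Int) → Int × Int := fun oz it =>
  let msg := pvMsg it
  if col < (msg.length : Int) then
    if PySem.List.pyGetD msg col 0 = 1 then (oz.1 + 1, oz.2) else (oz.1, oz.2 + 1)
  else oz

-- B's inner step over one (index, bit) pair
def bstep : List Int × List Int → Int × Int → List Int × List Int := fun oz cb =>
  if cb.2 = 1 then
    (PySem.List.pySetD oz.1 cb.1 (PySem.List.pyGetD oz.1 cb.1 0 + 1), oz.2)
  else
    (oz.1, PySem.List.pySetD oz.2 cb.1 (PySem.List.pyGetD oz.2 cb.1 0 + 1))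

theorem pySetD_natCast {xs : List Int} (s : Nat) (v : Int) :
    PySem.List.pySetD xs (s : Int) v = xs.set s v := by
  simp only [PySem.List.pySetD, PySem.List.pySet?, PySem.List.pyIdx?]
  rw [if_pos (by omega)]
  by_cases h : s < xs.length
  · rw [if_pos (by exact_mod_cast h)]; simp
  · rw [if_neg (by exact_mod_cast h)]
    simp [List.set_eq_of_length_le (by omega : xs.length ≤ s)]

theorem getD_set (l : List Int) (i c : Nat) (a : Int) :
    (l.set i a).getD c 0 = if c = i ∧ i < l.length then a else l.getD c 0 := by
  simp [List.getD_eq_getElem?_getD, List.getElem?_set]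
  split_ifs <;> simp_all

-- A's inner loop over items at column c computes the two tallies
theorem A_inner (items : List (List (String × List Int))) (c : Nat) (a b : Int) :
    items.foldl (astep (c : Int)) (a, b) = (a + cnt1 items c, b + cnt0 items c) := by
  induction items generalizing a b with
  | nil => simp [cnt1, cnt0]
  | cons it rest ih =>
      rw [List.foldl_cons, cnt1_cons, cnt0_cons]
      by_cases hlen : c < (pvMsg it).length
      · by_cases hv : (pvMsg it).getD c 0 = 1
        · rw [show astep (c : Int) (a, b) it = (a + 1, b) from by
            simp only [astep]
            rw [if_pos (by exact_mod_cast hlen : ((c : Int)) < ((pvMsg it).length : Int)),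
              PySem.List.pyGetD_natCast, if_pos hv]]
          rw [ih, if_pos ⟨hlen, hv⟩, if_neg (fun h => h.2 hv)]
          refine Prod.ext (by simp; ring) (by simp)
        · rw [show astep (c : Int) (a, b) it = (a, b + 1) from by
            simp only [astep]
            rw [if_pos (by exact_mod_cast hlen : ((c : Int)) < ((pvMsg it).length : Int)),
              PySem.List.pyGetD_natCast, if_neg hv]]
          rw [ih, if_neg (fun h => hv h.2), if_pos ⟨hlen, hv⟩]
          refine Prod.ext (by simp) (by simp; ring)
      · rw [show astep (c : Int) (a, b) it = (a, b) from by
          simp only [astep]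
          rw [if_neg (by exact_mod_cast hlen : ¬ ((c : Int)) < ((pvMsg it).length : Int))]]
        rw [ih, if_neg (fun h => hlen h.1), if_neg (fun h => hlen h.1)]
        refine Prod.ext ?_ ?_ <;> simp

-- position-c contribution of one message whose bits are indexed from s
def mcnt1 (msg : List Int) (s c : Nat) : Int :=
  if s ≤ c ∧ c - s < msg.length ∧ msg.getD (c - s) 0 = 1 then 1 else 0
def mcnt0 (msg : List Int) (s c : Nat) : Int :=
  if s ≤ c ∧ c - s < msg.length ∧ ¬ msg.getD (c - s) 0 = 1 then 1 else 0

theorem mcnt1_cons (b : Int) (rest : List Int) (s c : Nat) :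
    mcnt1 (b :: rest) s c = (if c = s ∧ b = 1 then 1 else 0) + mcnt1 rest (s + 1) c := by
  unfold mcnt1
  by_cases hc : c = s
  · have h0 : (if s + 1 ≤ c ∧ c - (s + 1) < rest.length ∧ rest.getD (c - (s + 1)) 0 = 1 then (1:Int) else 0) = 0 := by
      rw [if_neg (by rintro ⟨h1, -, -⟩; omega)]
    rw [h0, hc, Nat.sub_self]
    simp only [List.getD_cons_zero]
    by_cases hb : b = 1 <;> simp [hb]
  · have h1 : (if c = s ∧ b = 1 then (1:Int) else 0) = 0 := by
      rw [if_neg (by rintro ⟨u, -⟩; exact hc u)]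
    by_cases hlt : c < s
    · have h2 : (if s ≤ c ∧ c - s < (b :: rest).length ∧ (b :: rest).getD (c - s) 0 = 1 then (1:Int) else 0) = 0 := by
        rw [if_neg (by rintro ⟨u, -, -⟩; omega)]
      have h3 : (if s + 1 ≤ c ∧ c - (s + 1) < rest.length ∧ rest.getD (c - (s + 1)) 0 = 1 then (1:Int) else 0) = 0 := by
        rw [if_neg (by rintro ⟨u, -, -⟩; omega)]
      rw [h2, h1, h3]; norm_num
    · have e1 : c - s = (c - (s + 1)) + 1 := by omega
      rw [h1, e1, List.getD_cons_succ]
      rw [if_congr (show (s ≤ c ∧ c - (s+1) + 1 < (b :: rest).length ∧ rest.getD (c - (s+1)) 0 = 1)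
           ↔ (s + 1 ≤ c ∧ c - (s + 1) < rest.length ∧ rest.getD (c - (s + 1)) 0 = 1) from by
        simp only [List.length_cons]
        constructor <;> rintro ⟨u1, u2, u3⟩ <;> exact ⟨by omega, by omega, u3⟩) rfl rfl]
      ring

theorem mcnt0_cons (b : Int) (rest : List Int) (s c : Nat) :
    mcnt0 (b :: rest) s c = (if c = s ∧ ¬ b = 1 then 1 else 0) + mcnt0 rest (s + 1) c := by
  unfold mcnt0
  by_cases hc : c = s
  · have h0 : (if s + 1 ≤ c ∧ c - (s + 1) < rest.length ∧ ¬ rest.getD (c - (s + 1)) 0 = 1 then (1:Int) else 0) = 0 := by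
      rw [if_neg (by rintro ⟨h1, -, -⟩; omega)]
    rw [h0, hc, Nat.sub_self]
    simp only [List.getD_cons_zero]
    by_cases hb : b = 1 <;> simp [hb]
  · have h1 : (if c = s ∧ ¬ b = 1 then (1:Int) else 0) = 0 := by
      rw [if_neg (by rintro ⟨u, -⟩; exact hc u)]
    by_cases hlt : c < s
    · have h2 : (if s ≤ c ∧ c - s < (b :: rest).length ∧ ¬ (b :: rest).getD (c - s) 0 = 1 then (1:Int) else 0) = 0 := by
        rw [if_neg (by rintro ⟨u, -, -⟩; omega)]
      have h3 : (if s + 1 ≤ c ∧ c - (s + 1) < rest.length ∧ ¬ rest.getD (c - (s + 1)) 0 = 1 then (1:Int) else 0) = 0 := by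
        rw [if_neg (by rintro ⟨u, -, -⟩; omega)]
      rw [h2, h1, h3]; norm_num
    · have e1 : c - s = (c - (s + 1)) + 1 := by omega
      rw [h1, e1, List.getD_cons_succ]
      rw [if_congr (show (s ≤ c ∧ c - (s+1) + 1 < (b :: rest).length ∧ ¬ rest.getD (c - (s+1)) 0 = 1)
           ↔ (s + 1 ≤ c ∧ c - (s + 1) < rest.length ∧ ¬ rest.getD (c - (s + 1)) 0 = 1) from by
        simp only [List.length_cons]
        constructor <;> rintro ⟨u1, u2, u3⟩ <;> exact ⟨by omega, by omega, u3⟩) rfl rfl]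
      ring

theorem mcnt1_zero (msg : List Int) (c : Nat) :
    mcnt1 msg 0 c = if c < msg.length ∧ msg.getD c 0 = 1 then 1 else 0 := by
  simp [mcnt1]

theorem mcnt0_zero (msg : List Int) (c : Nat) :
    mcnt0 msg 0 c = if c < msg.length ∧ ¬ msg.getD c 0 = 1 then 1 else 0 := by
  simp [mcnt0]

-- B's inner loop over enumerate(msg, s): lengths preserved, tallies added pointwise
theorem B_inner (msg : List Int) (s : Nat) (o z : List Int)
    (ho : s + msg.length ≤ o.length) (hz : s + msg.length ≤ z.length) :
    ((PySem.List.enumerate msg (s : Int)).foldl bstep (o, z)).1.length = o.length ∧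
    ((PySem.List.enumerate msg (s : Int)).foldl bstep (o, z)).2.length = z.length ∧
    ∀ c : Nat,
      ((PySem.List.enumerate msg (s : Int)).foldl bstep (o, z)).1.getD c 0
        = o.getD c 0 + mcnt1 msg s c ∧
      ((PySem.List.enumerate msg (s : Int)).foldl bstep (o, z)).2.getD c 0
        = z.getD c 0 + mcnt0 msg s c := by
  induction msg generalizing s o z with
  | nil => simp [PySem.List.enumerate_nil, mcnt1, mcnt0]
  | cons b rest ih =>
      rw [PySem.List.enumerate_cons, List.foldl_cons,
        show ((s : Int) + 1) = ((s + 1 : Nat) : Int) from by push_cast; ring]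
      simp only [List.length_cons] at ho hz
      by_cases hb : b = 1
      · rw [show bstep (o, z) ((s : Int), b)
              = (o.set s (o.getD s 0 + 1), z) from by
            simp only [bstep]
            rw [if_pos hb, PySem.List.pyGetD_natCast, pySetD_natCast]]
        have ih' := ih (s + 1) (o.set s (o.getD s 0 + 1)) z
          (by simp; omega) (by omega)
        refine ⟨by rw [ih'.1]; simp, by rw [ih'.2.1], fun c => ?_⟩
        obtain ⟨h1, h2⟩ := ih'.2.2 c
        rw [h1, h2, getD_set, mcnt1_cons, mcnt0_cons]
        constructor
        · by_cases hc : c = s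
          · rw [if_pos ⟨hc, by omega⟩, if_pos ⟨hc, hb⟩, hc]; ring
          · rw [if_neg (fun h => hc h.1), if_neg (fun h => hc h.1)]; ring
        · rw [if_neg (fun h => h.2 hb)]; ring
      · rw [show bstep (o, z) ((s : Int), b)
              = (o, z.set s (z.getD s 0 + 1)) from by
            simp only [bstep]
            rw [if_neg hb, PySem.List.pyGetD_natCast, pySetD_natCast]]
        have ih' := ih (s + 1) o (z.set s (z.getD s 0 + 1))
          (by omega) (by simp; omega)
        refine ⟨by rw [ih'.1], by rw [ih'.2.1]; simp, fun c => ?_⟩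
        obtain ⟨h1, h2⟩ := ih'.2.2 c
        rw [h1, h2, getD_set, mcnt1_cons, mcnt0_cons]
        constructor
        · rw [if_neg (fun h => hb h.2)]; ring
        · by_cases hc : c = s
          · rw [if_pos ⟨hc, by omega⟩, if_pos ⟨hc, hb⟩, hc]; ring
          · rw [if_neg (fun h => hc h.1), if_neg (fun h => hc h.1)]; ring

-- B's outer loop: one pass over the items accumulates both tallies for every column
theorem B_outer (items : List (List (String × List Int))) (o z : List Int)
    (ho : ∀ it ∈ items, (pvMsg it).length ≤ o.length)
    (hz : ∀ it ∈ items, (pvMsg it).length ≤ z.length) :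
    (items.foldl (fun oz it => (PySem.List.enumerate (pvMsg it) 0).foldl bstep oz) (o, z)).1.length = o.length ∧
    (items.foldl (fun oz it => (PySem.List.enumerate (pvMsg it) 0).foldl bstep oz) (o, z)).2.length = z.length ∧
    ∀ c : Nat,
      (items.foldl (fun oz it => (PySem.List.enumerate (pvMsg it) 0).foldl bstep oz) (o, z)).1.getD c 0
        = o.getD c 0 + cnt1 items c ∧
      (items.foldl (fun oz it => (PySem.List.enumerate (pvMsg it) 0).foldl bstep oz) (o, z)).2.getD c 0
        = z.getD c 0 + cnt0 items c := by
  induction items generalizing o z with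
  | nil => simp [cnt1, cnt0]
  | cons it rest ih =>
      rw [List.foldl_cons]
      have hin := B_inner (pvMsg it) 0 o z
        (by simpa using ho it (by simp)) (by simpa using hz it (by simp))
      simp only [Nat.cast_zero] at hin
      obtain ⟨e1, e2, e3⟩ := hin
      have ih' := ih ((PySem.List.enumerate (pvMsg it) 0).foldl bstep (o, z)).1
        ((PySem.List.enumerate (pvMsg it) 0).foldl bstep (o, z)).2
        (fun it' h => by rw [e1]; exact ho it' (by simp [h]))
        (fun it' h => by rw [e2]; exact hz it' (by simp [h]))
      rw [Prod.mk.eta] at ih'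
      refine ⟨by rw [ih'.1, e1], by rw [ih'.2.1, e2], fun c => ⟨?_, ?_⟩⟩
      · rw [(ih'.2.2 c).1, (e3 c).1, mcnt1_zero, cnt1_cons]; ring
      · rw [(ih'.2.2 c).2, (e3 c).2, mcnt0_zero, cnt0_cons]; ring

theorem getD_replicate_zero (N c : Nat) : (List.replicate N (0:Int)).getD c 0 = 0 := by
  simp [List.getD_eq_getElem?_getD, List.getElem?_replicate]
  split_ifs <;> rfl

-- ===== VERDICT (by name: the statement is the Claim_ definition above) =====
theorem merge_extracted_messages_spec : Claim_equal_merge_extracted_messages := by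
  intro items _ hpre
  unfold Spec_merge_extracted_messages
  obtain ⟨hne, -⟩ := hpre
  obtain ⟨m, hm⟩ : ∃ m, PySem.List.max?
      (items.map (fun it => ((pvMsg it).length : Int))) (fun x => x) = some m := by
    cases h : PySem.List.max? (items.map (fun it => ((pvMsg it).length : Int))) (fun x => x) with
    | none =>
        exact absurd ((PySem.List.max?_eq_none_iff _ (fun x => x)).mp h) (by simpa using hne)
    | some m => exact ⟨m, rfl⟩
  have hmax : ∀ it ∈ items, ((pvMsg it).length : Int) ≤ m := by
    intro it hit
    simpa using PySem.List.max?_isMax hm _ (List.mem_map_of_mem hit)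
  have hm0 : 0 ≤ m := by
    obtain ⟨it, -, hit⟩ := List.mem_map.mp (PySem.List.max?_mem hm)
    omega
  have hbound : ∀ it ∈ items, (pvMsg it).length ≤ m.toNat := by
    intro it hit
    have := hmax it hit
    omega
  -- A computes the per-column majority from the tallies
  have hA : merge_extracted_messages items
      = (List.range m.toNat).map (fun k =>
          if cnt0 items k ≤ cnt1 items k then (1 : Int) else 0) := by
    unfold merge_extracted_messages
    rw [hm]
    show (PySem.List.pyRange 0 m 1).foldl
        (fun result col => result ++
          [if (items.foldl (astep col) (0, 0)).2 ≤ (items.foldl (astep col) (0, 0)).1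
            then (1 : Int) else 0]) [] = _
    rw [PySem.List.foldl_append_singleton_eq_map, List.nil_append,
      PySem.List.pyRange_one, List.map_map]
    simp only [Int.sub_zero]
    refine List.map_congr_left (fun k _ => ?_)
    simp only [Function.comp_apply, zero_add, A_inner items k 0 0]
  -- B computes the same tallies in its two count arrays
  have hB : merge_extracted_messages_alt items
      = (((items.foldl (fun oz it => (PySem.List.enumerate (pvMsg it) 0).foldl bstep oz)
            (List.replicate m.toNat 0, List.replicate m.toNat 0)).1.zip
          (items.foldl (fun oz it => (PySem.List.enumerate (pvMsg it) 0).foldl bstep oz)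
            (List.replicate m.toNat 0, List.replicate m.toNat 0)).2).map
          (fun p => if p.2 ≤ p.1 then (1 : Int) else 0)) := by
    unfold merge_extracted_messages_alt
    rw [hm]
    rfl
  obtain ⟨hl1, hl2, hgd⟩ := B_outer items (List.replicate m.toNat 0) (List.replicate m.toNat 0)
    (fun it h => by simpa using hbound it h) (fun it h => by simpa using hbound it h)
  rw [hA, hB]
  refine List.ext_getElem (by simp [hl1, hl2]) (fun i h1 h2 => ?_)
  simp only [List.getElem_map, List.getElem_zip, List.getElem_range]
  have hi1 : i < (items.foldl (fun oz it => (PySem.List.enumerate (pvMsg it) 0).foldl bstep oz)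
      (List.replicate m.toNat 0, List.replicate m.toNat 0)).1.length := by
    simp at h2; omega
  have hi2 : i < (items.foldl (fun oz it => (PySem.List.enumerate (pvMsg it) 0).foldl bstep oz)
      (List.replicate m.toNat 0, List.replicate m.toNat 0)).2.length := by
    simp at h2; omega
  rw [show (items.foldl (fun oz it => (PySem.List.enumerate (pvMsg it) 0).foldl bstep oz)
        (List.replicate m.toNat 0, List.replicate m.toNat 0)).1[i]
      = (items.foldl (fun oz it => (PySem.List.enumerate (pvMsg it) 0).foldl bstep oz)
        (List.replicate m.toNat 0, List.replicate m.toNat 0)).1.getD i 0 from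
      (List.getD_eq_getElem _ _ hi1).symm,
    show (items.foldl (fun oz it => (PySem.List.enumerate (pvMsg it) 0).foldl bstep oz)
        (List.replicate m.toNat 0, List.replicate m.toNat 0)).2[i]
      = (items.foldl (fun oz it => (PySem.List.enumerate (pvMsg it) 0).foldl bstep oz)
        (List.replicate m.toNat 0, List.replicate m.toNat 0)).2.getD i 0 from
      (List.getD_eq_getElem _ _ hi2).symm,
    (hgd i).1, (hgd i).2, getD_replicate_zero, zero_add, zero_add]
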